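-- pv_equiv track=rewrite | github.com/bbkrl/kioki-lab1 | keyPhrase.py | number_key
-- ===== SOURCE A (Python) =====
-- from copy import deepcopy
--
-- def number_key(key_phrase):
--     key_list = list(key_phrase)
--     sorted_list_key = sorted(key_phrase)
--     sorted_key = ''.join(sorted_list_key)
--     deepcopy_sorted_list_key = deepcopy(sorted_list_key)
--     keyword_indexes = []
--     for i in range(len(key_list)):
--         symbol_index = deepcopy_sorted_list_key.index(key_list[i])
--         keyword_indexes.append(symbol_index)
--         deepcopy_sorted_list_key[symbol_index] = "Q"
--
--     # letters = tuple(string.ascii_lowercase)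
--     #
--     # key_phrase = key_phrase.lower()
--     # key_number = list(key_phrase)
--     #
--     # counter = 0
--     #
--     # for letter_index, letter_value in enumerate(letters):
--     #     for key_index, key_value in enumerate(key_phrase):
--     #         if letter_value == key_value:
--     #             key_number[key_index] = counter
--     #             counter += 1
--
--     return keyword_indexes
-- ===== SOURCE B (Python) =====
-- def number_key(key_phrase):
--     # rank of each character under a stable sort: number of (char, position)
--     # pairs strictly smaller than this one
--     return [sum(1 for j, d in enumerate(key_phrase)
--                 if d < c or (d == c and j < i))
--             for i, c in enumerate(key_phrase)]
-- ===== Notes on version B (the rewrite author's own statement) =====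
-- stated objective: simpler
-- what changed: Replaces the destructive marking loop (repeated list.index on a sorted copy with consumed slots overwritten by a letter-Q sentinel) by a direct closed-form count: each position's number is the count of (char, position) pairs strictly smaller than its own.
-- intended difference: On phrases where the letter Q occurs after some character that is not greater than it, A's sentinel shadows the real letter Q in the marked list, so A returns a duplicated too-small index for such positions (e.g. [0,0] for the witness "AQ"), while B returns the intended stable sorted rank ([0,1]); B's value is what a key-numbering function is for. — e.g. on number_key("AQ"): A returns [0, 0], B returns [0, 1]
import Mathlib
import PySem

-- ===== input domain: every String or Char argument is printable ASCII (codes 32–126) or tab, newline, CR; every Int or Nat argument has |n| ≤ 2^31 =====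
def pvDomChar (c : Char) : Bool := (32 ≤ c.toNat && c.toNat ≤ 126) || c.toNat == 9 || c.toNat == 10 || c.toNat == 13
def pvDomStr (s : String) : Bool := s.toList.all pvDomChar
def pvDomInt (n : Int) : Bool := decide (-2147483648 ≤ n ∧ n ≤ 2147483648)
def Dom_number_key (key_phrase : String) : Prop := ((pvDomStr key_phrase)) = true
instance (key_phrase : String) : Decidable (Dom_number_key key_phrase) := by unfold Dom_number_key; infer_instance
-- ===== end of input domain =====

-- B replaces A's destructive marking loop (repeated .index on a sorted copy, consumed
-- slots overwritten by the sentinel "Q") with a direct count of smaller (char, position)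
-- pairs; on phrases where a real letter Q collides with A's sentinel the two differ (see D_).

-- ===== PORT A =====
-- one iteration of A's for-loop: find key_list[i] in the marked sorted copy, record the
-- index, overwrite that slot with "Q"; the 'none' branch is Python's ValueError, which is
-- unreachable (the searched character is always present), kept only to make the port total
def nkStep (st : List Char × List Int) (c : Char) : List Char × List Int :=
  match PySem.List.index? st.1 c with
  | some idx => (st.1.set idx 'Q', st.2 ++ [(idx : Int)])
  | none => (st.1, st.2)

def number_key (key_phrase : String) : List Int :=
  let key_list := key_phrase.toList
  let sorted_list_key := PySem.List.sorted key_list (fun c => c) false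
  -- sorted_key = ''.join(...) is computed by A but never used; deepcopy copies the list
  ((PySem.List.pyRange 0 (PySem.List.len key_list) 1).foldl
      (fun st i => nkStep st (PySem.List.pyGetD key_list i ' ')) (sorted_list_key, [])).2

-- ===== PORT B =====
def number_key_alt (key_phrase : String) : List Int :=
  (PySem.List.enumerate key_phrase.toList 0).map (fun ic =>
    (PySem.List.enumerate key_phrase.toList 0).foldl
      (fun acc jd => if jd.2 < ic.2 ∨ (jd.2 = ic.2 ∧ jd.1 < ic.1) then acc + 1 else acc)
      (0 : Int))

-- ===== PRECONDITION & SPEC =====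
-- On phrases where the letter Q occurs after some character that is not greater than it,
-- A's sentinel shadows the real letter Q in the marked list, so A returns a duplicated
-- too-small index for such positions (A gives [0,0] on the witness where B gives the
-- intended stable sorted ranks [0,1]).
def D_number_key (key_phrase : String) : Prop :=
  ∃ j : Fin key_phrase.toList.length, key_phrase.toList[j] = 'Q' ∧
    ∃ i : Fin key_phrase.toList.length, (i : Nat) < (j : Nat) ∧ key_phrase.toList[i] ≤ 'Q'
instance (key_phrase : String) : Decidable (D_number_key key_phrase) := by
  unfold D_number_key; infer_instance

def Spec_number_key (key_phrase : String) (out : List Int) : Prop :=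
  ¬ D_number_key key_phrase → out = number_key_alt key_phrase
instance (key_phrase : String) (out : List Int) : Decidable (Spec_number_key key_phrase out) := by
  unfold Spec_number_key; infer_instance

def pvDiffWitness_number_key : String := "AQ"
def pvDiffWitnessOut_number_key : (List Int) × (List Int) := ([0, 0], [0, 1])

-- ===== CLAIM (what is proved, stated in full; the proofs are below) =====
def Claim_unchanged_number_key : Prop := ∀ (key_phrase : String), Dom_number_key key_phrase → Spec_number_key key_phrase (number_key key_phrase)
def Claim_changed_number_key : Prop := Dom_number_key (pvDiffWitness_number_key) ∧ D_number_key (pvDiffWitness_number_key) ∧ number_key (pvDiffWitness_number_key) = pvDiffWitnessOut_number_key.1 ∧ number_key_alt (pvDiffWitness_number_key) = pvDiffWitnessOut_number_key.2 ∧ pvDiffWitnessOut_number_key.1 ≠ pvDiffWitnessOut_number_key.2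
def Claim_exact_number_key : Prop := ∀ (key_phrase : String), Dom_number_key key_phrase → D_number_key key_phrase → number_key key_phrase ≠ number_key_alt key_phrase

-- ===== LEMMAS AND PROOFS =====

-- the rank of position i: number of characters strictly smaller than s[i], plus the
-- number of equal characters strictly before position i (the stable sorted rank)
def cntLt (s : List Char) (c : Char) : Nat := s.countP (fun d => decide (d < c))
def cntEq (s : List Char) (c : Char) : Nat := s.countP (fun d => decide (d = c))
def cntEqTo (s : List Char) (c : Char) (i : Nat) : Nat := (s.take i).countP (fun d => decide (d = c))
def rkn (s : List Char) (i : Nat) : Nat := cntLt s (s.getD i ' ') + cntEqTo s (s.getD i ' ') i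

def srt (s : List Char) : List Char := PySem.List.sorted s (fun c => c) false

-- the marked sorted copy after the first k loop iterations
def Mlist (s : List Char) (k : Nat) : List Char :=
  (srt s).mapIdx (fun p c => if (List.range k).any (fun j => rkn s j == p) then 'Q' else c)

-- no letter Q among the first k characters is preceded by a character that is ≤ it
def QOK (s : List Char) (k : Nat) : Prop :=
  ∀ j < k, s.getD j ' ' = 'Q' → ∀ i < j, 'Q' < s.getD i ' '

theorem srt_perm (s : List Char) : (srt s).Perm s := by
  exact PySem.List.sorted_perm s (fun c => c) false


theorem srt_length (s : List Char) : (srt s).length = s.length := by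
  exact (srt_perm s).length_eq


theorem srt_countP (s : List Char) (p : Char → Bool) : (srt s).countP p = s.countP p := by
  exact (srt_perm s).countP_eq p


theorem srt_pairwise (s : List Char) : (srt s).Pairwise (· ≤ ·) := by
  exact PySem.List.sorted_pairwise s (fun c => c)


-- on a ≤-sorted list, a downward-closed predicate holds at position p iff p is below its count
theorem sorted_cnt_iff (pd : Char → Bool) (hmono : ∀ d e : Char, d ≤ e → pd e = true → pd d = true) :
    ∀ (t : List Char), t.Pairwise (· ≤ ·) →
      ∀ p (hp : p < t.length), (pd t[p] = true ↔ p < t.countP pd) := by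
  intro t
  induction t with
  | nil => intro _ p hp; simp at hp
  | cons a t ih =>
    intro ht p hp
    have ha := (List.pairwise_cons.mp ht).1
    have ht' := (List.pairwise_cons.mp ht).2
    by_cases hac : pd a = true
    · cases p with
      | zero => simp [hac]
      | succ q =>
        have hq : q < t.length := by simpa using hp
        have h := ih ht' q hq
        simp only [List.getElem_cons_succ, List.countP_cons, hac, if_pos]
        rw [h]; omega
    · have hall : ∀ d ∈ t, ¬(pd d = true) := fun d hd hdc => hac (hmono a d (ha d hd) hdc)
      have hcnt : t.countP pd = 0 := List.countP_eq_zero.mpr hall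
      cases p with
      | zero => simp [hac, hcnt]
      | succ q =>
        have hq : q < t.length := by simpa using hp
        simp only [List.getElem_cons_succ, List.countP_cons, hac, hcnt]
        simp only [Bool.not_eq_true] at hall
        simp [hall _ (List.getElem_mem hq)]

theorem sorted_lt_iff (t : List Char) (ht : t.Pairwise (· ≤ ·)) (c : Char) :
    ∀ p (hp : p < t.length), (t[p] < c ↔ p < t.countP (fun d => decide (d < c))) := by
  intro p hp
  rw [← sorted_cnt_iff (fun d => decide (d < c))
    (fun d e hde he => by simp at he ⊢; exact lt_of_le_of_lt hde he) t ht p hp]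
  simp


theorem sorted_le_iff (t : List Char) (ht : t.Pairwise (· ≤ ·)) (c : Char) :
    ∀ p (hp : p < t.length), (t[p] ≤ c ↔ p < t.countP (fun d => decide (d ≤ c))) := by
  intro p hp
  rw [← sorted_cnt_iff (fun d => decide (d ≤ c))
    (fun d e hde he => by simp at he ⊢; exact le_trans hde he) t ht p hp]
  simp


theorem countP_le_split (s : List Char) (c : Char) :
    s.countP (fun d => decide (d ≤ c)) = cntLt s c + cntEq s c := by
  unfold cntLt cntEq
  induction s with
  | nil => simp
  | cons a s ih =>
    simp only [List.countP_cons]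
    rcases lt_trichotomy a c with h | h | h
    · simp [h, le_of_lt h, ne_of_lt h]; omega
    · subst h; simp; omega
    · simp [not_lt.mpr (le_of_lt h), not_le.mpr h, (ne_of_lt h).symm]; omega


theorem sorted_eq_iff (t : List Char) (ht : t.Pairwise (· ≤ ·)) (c : Char)
    (p : Nat) (hp : p < t.length) :
    t[p] = c ↔ (t.countP (fun d => decide (d < c)) ≤ p ∧ p < t.countP (fun d => decide (d ≤ c))) := by
  have h1 := sorted_lt_iff t ht c p hp
  have h2 := sorted_le_iff t ht c p hp
  constructor
  · intro he
    have hle : p < t.countP (fun d => decide (d ≤ c)) := h2.mp (by simp [he])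
    have hlt : ¬ p < t.countP (fun d => decide (d < c)) := fun hc => by
      have := h1.mpr hc; simp [he] at this
    omega
  · rintro ⟨hl, hr⟩
    have hle : t[p] ≤ c := h2.mpr hr
    have hlt : ¬ t[p] < c := fun hc => by have := h1.mp hc; omega
    exact le_antisymm hle (not_lt.mp hlt)


theorem cntEqTo_lt (s : List Char) (i : Nat) (hi : i < s.length) :
    cntEqTo s s[i] i < cntEq s s[i] := by
  have hdrop : s.drop i = s[i] :: s.drop (i + 1) := List.drop_eq_getElem_cons hi
  have key : ∀ c, c = s[i] → cntEqTo s c i < cntEq s c := by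
    intro c hc
    unfold cntEq cntEqTo
    conv_rhs => rw [← List.take_append_drop i s]
    rw [List.countP_append, hdrop, List.countP_cons]
    simp [hc]
  exact key s[i] rfl


theorem rkn_lt_le (s : List Char) (i : Nat) (hi : i < s.length) :
    rkn s i < s.countP (fun d => decide (d ≤ s[i])) := by
  have hgd : s.getD i ' ' = s[i] := List.getD_eq_getElem s ' ' hi
  have h1 := cntEqTo_lt s i hi
  have h2 := countP_le_split s s[i]
  unfold rkn
  rw [hgd]
  omega


theorem rkn_lt_length (s : List Char) (i : Nat) (hi : i < s.length) :
    rkn s i < s.length := by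
  have h1 := rkn_lt_le s i hi
  have h2 : s.countP (fun d => decide (d ≤ s[i])) ≤ s.length := List.countP_le_length
  omega


theorem cntEqTo_mono (s : List Char) (c : Char) (i j : Nat) (hij : i < j)
    (_hj : j ≤ s.length) (hi : i < s.length) (hc : s[i] = c) :
    cntEqTo s c i < cntEqTo s c j := by
  unfold cntEqTo
  have hj' : j = i + (j - i) := by omega
  rw [hj', List.take_add, List.countP_append]
  have hdrop : s.drop i = s[i] :: s.drop (i + 1) := List.drop_eq_getElem_cons hi
  have hpos : 1 ≤ j - i := by omega
  have h1 : (j - i) = ((j - i) - 1) + 1 := by omega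
  rw [hdrop, h1, List.take_succ_cons, List.countP_cons]
  simp [hc]


theorem cntLe_le_cntLt (s : List Char) (c c' : Char) (h : c < c') :
    s.countP (fun d => decide (d ≤ c)) ≤ cntLt s c' := by
  unfold cntLt
  apply List.countP_mono_left
  intro a _ ha
  simp at ha ⊢
  exact lt_of_le_of_lt ha h


theorem cntLt_le_rkn (s : List Char) (i : Nat) (hi : i < s.length) :
    cntLt s s[i] ≤ rkn s i := by
  unfold rkn
  rw [List.getD_eq_getElem s ' ' hi]
  omega

theorem rkn_lt_of_char_lt (s : List Char) (i j : Nat) (hi : i < s.length) (hj : j < s.length)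
    (h : s[i] < s[j]) : rkn s i < rkn s j :=
  lt_of_lt_of_le (lt_of_lt_of_le (rkn_lt_le s i hi) (cntLe_le_cntLt s s[i] s[j] h))
    (cntLt_le_rkn s j hj)

theorem rkn_lt_of_lt (s : List Char) (i j : Nat) (hi : i < s.length) (hj : j < s.length)
    (hij : i < j) (hc : s[i] = s[j]) : rkn s i < rkn s j := by
  unfold rkn
  rw [List.getD_eq_getElem s ' ' hi, List.getD_eq_getElem s ' ' hj, hc]
  have := cntEqTo_mono s s[j] i j hij (le_of_lt hj) hi hc
  omega

theorem rkn_ne (s : List Char) (i j : Nat) (hi : i < s.length) (hj : j < s.length)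
    (hij : i ≠ j) : rkn s i ≠ rkn s j := by
  rcases lt_trichotomy s[i] s[j] with h | h | h
  · exact ne_of_lt (rkn_lt_of_char_lt s i j hi hj h)
  · rcases Nat.lt_or_ge i j with hij2 | hij2
    · exact ne_of_lt (rkn_lt_of_lt s i j hi hj hij2 h)
    · exact (ne_of_lt (rkn_lt_of_lt s j i hj hi (by omega) h.symm)).symm
  · exact (ne_of_lt (rkn_lt_of_char_lt s j i hj hi h)).symm


theorem exists_hit (s : List Char) (c : Char) :
    ∀ (k e : Nat), e < cntEqTo s c k →
      ∃ j, j < k ∧ ∃ (hj : j < s.length), s[j] = c ∧ cntEqTo s c j = e := by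
  intro k
  induction k with
  | zero => intro e he; simp [cntEqTo] at he
  | succ k ih =>
    intro e he
    by_cases hlen : k < s.length
    · have hsucc : cntEqTo s c (k + 1) = cntEqTo s c k + (if s[k] = c then 1 else 0) := by
        unfold cntEqTo
        rw [List.take_add_one, List.getElem?_eq_getElem hlen]
        simp only [Option.toList_some, List.countP_append, List.countP_singleton]
        by_cases h : s[k] = c <;> simp [h]
      by_cases hc : e < cntEqTo s c k
      · obtain ⟨j, hj, hjl, hcj, hej⟩ := ih e hc
        exact ⟨j, by omega, hjl, hcj, hej⟩
      · have h1 : s[k] = c := by by_contra hne; rw [hsucc] at he; simp [hne] at he; omega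
        have h2 : cntEqTo s c k = e := by rw [hsucc] at he; simp [h1] at he; omega
        exact ⟨k, by omega, hlen, h1, h2⟩
    · have heq : cntEqTo s c (k + 1) = cntEqTo s c k := by
        unfold cntEqTo
        rw [List.take_of_length_le (by omega), List.take_of_length_le (by omega)]
      obtain ⟨j, hj, hjl, hcj, hej⟩ := ih e (by omega)
      exact ⟨j, by omega, hjl, hcj, hej⟩


theorem Mlist_length (s : List Char) (k : Nat) : (Mlist s k).length = s.length := by
  unfold Mlist
  simp [srt_length]


theorem Mlist_getElem (s : List Char) (k p : Nat) (hp : p < s.length) :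
    (Mlist s k)[p]'(by rw [Mlist_length]; exact hp) =
      if (∃ j, j < k ∧ rkn s j = p) then 'Q' else (srt s)[p]'(by rw [srt_length]; exact hp) := by
  have hb : ((List.range k).any fun j => rkn s j == p) = true ↔ (∃ j, j < k ∧ rkn s j = p) := by
    simp
  unfold Mlist
  rw [List.getElem_mapIdx]
  split_ifs with h1 h2 h2
  · rfl
  · exact absurd (hb.mp h1) h2
  · exact absurd (hb.mpr h2) (by simpa using h1)
  · rfl


theorem Mlist_zero (s : List Char) : Mlist s 0 = srt s := by
  unfold Mlist
  apply List.ext_getElem (by simp)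
  intro p h1 h2
  simp


theorem Mlist_succ (s : List Char) (k : Nat) :
    Mlist s (k + 1) = (Mlist s k).set (rkn s k) 'Q' := by
  apply List.ext_getElem (by simp [Mlist_length])
  intro p h1 h2
  have hp : p < s.length := by simpa [Mlist_length] using h1
  rw [List.getElem_set]
  rw [Mlist_getElem s (k + 1) p hp, Mlist_getElem s k p hp]
  have hiff : (∃ j, j < k + 1 ∧ rkn s j = p) ↔ (rkn s k = p ∨ ∃ j, j < k ∧ rkn s j = p) := by
    constructor
    · rintro ⟨j, hj, hjp⟩
      rcases Nat.lt_or_ge j k with h | h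
      · exact Or.inr ⟨j, h, hjp⟩
      · have hjk : j = k := by omega
        subst hjk
        exact Or.inl hjp
    · rintro (h | ⟨j, hj, hjp⟩)
      · exact ⟨k, by omega, h⟩
      · exact ⟨j, by omega, hjp⟩
  by_cases hB : rkn s k = p
  · rw [if_pos (hiff.mpr (Or.inl hB)), if_pos hB]
  · by_cases hC : ∃ j, j < k ∧ rkn s j = p
    · rw [if_pos (hiff.mpr (Or.inr hC)), if_neg hB, if_pos hC]
    · rw [if_neg (fun h => by rcases hiff.mp h with h' | h' <;> [exact hB h'; exact hC h']),
        if_neg hB, if_neg hC]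


theorem index?_eq_some_of (l : List Char) (v : Char) (m : Nat) (hm : m < l.length)
    (hv : l[m] = v) (hlt : ∀ p (hp : p < m), l[p]'(by omega) ≠ v) :
    PySem.List.index? l v = some m := by
  rw [PySem.List.index?_eq_some_iff]
  refine ⟨l.take m, l.drop (m + 1), ?_, by simp [hm.le], ?_⟩
  · conv_lhs => rw [← List.take_append_drop m l]
    congr 1
    rw [← hv]
    exact (List.getElem_cons_drop hm).symm
  · intro hmem
    obtain ⟨p, hp, he⟩ := List.mem_iff_getElem.mp hmem
    have hpm : p < m := by simpa [hm.le] using hp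
    exact hlt p hpm (by rwa [List.getElem_take] at he)


theorem index_step (s : List Char) (k : Nat) (hk : k < s.length) (hQ : QOK s (k + 1)) :
    PySem.List.index? (Mlist s k) (s.getD k ' ') = some (rkn s k) := by
  have hgd : s.getD k ' ' = s[k] := List.getD_eq_getElem s ' ' hk
  rw [hgd]
  have hrk : rkn s k < s.length := rkn_lt_length s k hk
  have hsl : (srt s).length = s.length := srt_length s
  apply index?_eq_some_of (Mlist s k) s[k] (rkn s k) (by rwa [Mlist_length])
  · rw [Mlist_getElem s k (rkn s k) hrk, if_neg]
    · -- (srt s)[rkn s k] = s[k]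
      rw [sorted_eq_iff (srt s) (srt_pairwise s) s[k] (rkn s k) (by omega)]
      rw [srt_countP, srt_countP]
      have h1 := cntLt_le_rkn s k hk
      have h2 := rkn_lt_le s k hk
      exact ⟨h1, h2⟩
    · rintro ⟨j, hjk, hjr⟩
      exact rkn_ne s j k (by omega) hk (by omega) hjr
  · intro p hp
    have hpl : p < s.length := by omega
    rw [Mlist_getElem s k p hpl]
    split_ifs with hmark
    · -- a marked slot holds the sentinel; were s[k] that letter, every earlier mark would lie beyond rkn s k
      intro hQc
      obtain ⟨j, hjk, hjp⟩ := hmark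
      have hjl : j < s.length := by omega
      have hQlt : 'Q' < s[j] := by
        have := hQ k (by omega) (by rw [hgd, ← hQc]) j hjk
        rwa [List.getD_eq_getElem s ' ' hjl] at this
      have h1 : s.countP (fun d => decide (d ≤ 'Q')) ≤ cntLt s s[j] :=
        cntLe_le_cntLt s 'Q' s[j] hQlt
      have h2 : cntLt s s[j] ≤ rkn s j := cntLt_le_rkn s j hjl
      have h3 : rkn s k < s.countP (fun d => decide (d ≤ s[k])) := rkn_lt_le s k hk
      rw [← hQc] at h3
      omega
    · by_cases hplt : p < cntLt s s[k]
      · have : (srt s)[p]'(by omega) < s[k] :=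
          (sorted_lt_iff (srt s) (srt_pairwise s) s[k] p (by omega)).mpr
            (by rw [srt_countP]; exact hplt)
        exact ne_of_lt this
      · exfalso
        apply hmark
        have hrkn : rkn s k = cntLt s s[k] + cntEqTo s s[k] k := by
          unfold rkn; rw [hgd]
        obtain ⟨j, hjk, hjl, hjc, hje⟩ :=
          exists_hit s s[k] k (p - cntLt s s[k]) (by omega)
        refine ⟨j, hjk, ?_⟩
        unfold rkn
        rw [List.getD_eq_getElem s ' ' hjl, hjc, hje]
        omega


theorem loopSeg (s : List Char) :
    ∀ (m k : Nat) (acc : List Int), k + m ≤ s.length → QOK s (k + m) →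
      (((s.drop k).take m).foldl nkStep (Mlist s k, acc)) =
        (Mlist s (k + m), acc ++ (List.range' k m).map (fun i => (rkn s i : Int))) := by
  intro m
  induction m with
  | zero =>
    intro k acc _ _
    simp
  | succ m ih =>
    intro k acc hlen hQ
    have hk : k < s.length := by omega
    have hdrop : s.drop k = s[k] :: s.drop (k + 1) := List.drop_eq_getElem_cons hk
    rw [hdrop, List.take_succ_cons, List.foldl_cons]
    have hstep : nkStep (Mlist s k, acc) s[k] = (Mlist s (k + 1), acc ++ [(rkn s k : Int)]) := by
      unfold nkStep
      have hidx := index_step s k hk (fun j hj => hQ j (by omega))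
      rw [List.getD_eq_getElem s ' ' hk] at hidx
      rw [hidx]
      simp [Mlist_succ]
    rw [hstep]
    have := ih (k + 1) (acc ++ [(rkn s k : Int)]) (by omega) (fun j hj => hQ j (by omega))
    rw [this, show k + 1 + m = k + (m + 1) from by omega, List.range'_succ]
    simp


theorem number_key_eq_map (s : List Char) (hQ : QOK s s.length) :
    ((PySem.List.pyRange 0 (PySem.List.len s) 1).foldl
        (fun st i => nkStep st (PySem.List.pyGetD s i ' '))
        (PySem.List.sorted s (fun c => c) false, [])).2 =
      (List.range' 0 s.length).map (fun i => (rkn s i : Int)) := by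
  rw [PySem.List.foldl_pyRange_zero_pyGetD]
  have key := loopSeg s s.length 0 [] (by omega) (by simpa using hQ)
  rw [show (s.drop 0).take s.length = s from by simp] at key
  rw [show PySem.List.sorted s (fun c => c) false = Mlist s 0 from (Mlist_zero s).symm, key]
  simp


theorem count_enum (s : List Char) (c : Char) :
    ∀ (k i : Nat),
      (PySem.List.enumerate s (k : Int)).countP
          (fun jd => decide (jd.2 < c ∨ (jd.2 = c ∧ jd.1 < (i : Int)))) =
        s.countP (fun d => decide (d < c)) + (s.take (i - k)).countP (fun d => decide (d = c)) := by
  induction s with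
  | nil => intro k i; simp [PySem.List.enumerate_nil]
  | cons d s ih =>
    intro k i
    rw [PySem.List.enumerate_cons]
    simp only [List.countP_cons]
    have hrec := ih (k + 1) i
    push_cast at hrec
    by_cases hki : k < i
    · have h1 : i - k = (i - (k + 1)) + 1 := by omega
      have hk2 : ((k : Int) < (i : Int)) := by exact_mod_cast hki
      rw [h1, List.take_succ_cons, List.countP_cons, hrec]
      by_cases hdc : d < c <;> by_cases hde : d = c <;>
        simp [hdc, hde, hk2] <;> omega
    · have h1 : i - k = 0 := by omega
      have h2 : i - (k + 1) = 0 := by omega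
      have hk2 : ¬ ((k : Int) < (i : Int)) := by exact_mod_cast hki
      rw [h2] at hrec
      rw [h1, hrec]
      by_cases hdc : d < c <;> by_cases hde : d = c <;>
        simp [hdc, hde, hk2]


theorem alt_eq_map (s : List Char) :
    (PySem.List.enumerate s 0).map (fun ic =>
        (PySem.List.enumerate s 0).foldl
          (fun acc jd => if jd.2 < ic.2 ∨ (jd.2 = ic.2 ∧ jd.1 < ic.1) then acc + 1 else acc)
          (0 : Int)) =
      (List.range' 0 s.length).map (fun i => (rkn s i : Int)) := by
  apply List.ext_getElem
  · simp [PySem.List.length_enumerate]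
  intro p h1 h2
  have hp : p < s.length := by simpa [PySem.List.length_enumerate] using h1
  simp only [List.getElem_map, PySem.List.getElem_enumerate, List.getElem_range']
  rw [PySem.List.foldl_ite_add_one]
  have hc := count_enum s s[p] 0 p
  simp only [Nat.cast_zero, Nat.sub_zero] at hc
  simp only [zero_add, one_mul]
  rw [hc]
  unfold rkn cntLt cntEqTo
  rw [List.getD_eq_getElem s ' ' hp]


theorem notD_QOK (key_phrase : String) (h : ¬ D_number_key key_phrase) :
    QOK key_phrase.toList key_phrase.toList.length := by
  intro j hj hjq i hij
  by_contra hle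
  have hil : i < key_phrase.toList.length := by omega
  apply h
  refine ⟨⟨j, hj⟩, ?_, ⟨i, hil⟩, hij, ?_⟩
  · have hgd := List.getD_eq_getElem key_phrase.toList ' ' hj
    simp only [Fin.getElem_fin]
    rw [← hgd]
    exact hjq
  · have hgd := List.getD_eq_getElem key_phrase.toList ' ' hil
    simp only [Fin.getElem_fin]
    rw [← hgd]
    exact not_lt.mp hle



-- every iteration of A's loop appends to the accumulator, whatever the list state is
theorem foldl_tail_append (u : List Char) :
    ∀ (l : List Char) (acc : List Int), ∃ t, (u.foldl nkStep (l, acc)).2 = acc ++ t := by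
  induction u with
  | nil => intro l acc; exact ⟨[], by simp⟩
  | cons c u ih =>
    intro l acc
    rw [List.foldl_cons]
    rcases h : PySem.List.index? l c with _ | idx
    · obtain ⟨t, ht⟩ := ih l acc
      exact ⟨t, by rw [show nkStep (l, acc) c = (l, acc) from by unfold nkStep; rw [h]]; exact ht⟩
    · obtain ⟨t, ht⟩ := ih (l.set idx 'Q') (acc ++ [(idx : Int)])
      refine ⟨[(idx : Int)] ++ t, ?_⟩
      rw [show nkStep (l, acc) c = (l.set idx 'Q', acc ++ [(idx : Int)]) from by unfold nkStep; rw [h]]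
      rw [ht, List.append_assoc]

-- when the letter Q at j0 is preceded by a character ≤ it, the marked list at step j0
-- already holds that letter strictly before slot rkn s j0
theorem exists_Q_slot (s : List Char) (j0 : Nat) (hj0 : j0 < s.length) (hQ0 : s[j0] = 'Q')
    (i : Nat) (hi : i < j0) (hle : s[i]'(by omega) ≤ 'Q') :
    ∃ p, ∃ hp : p < s.length, p < rkn s j0 ∧
      (Mlist s j0)[p]'(by rw [Mlist_length]; exact hp) = 'Q' := by
  have hil : i < s.length := by omega
  have hrkj : rkn s j0 = cntLt s 'Q' + cntEqTo s 'Q' j0 := by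
    unfold rkn; rw [List.getD_eq_getElem s ' ' hj0, hQ0]
  have hrkln := rkn_lt_length s j0 hj0
  rcases eq_or_lt_of_le hle with heq | hlt
  · -- an earlier real occurrence: that slot holds the letter whether marked or not
    have h1 : cntEqTo s 'Q' i < cntEqTo s 'Q' j0 :=
      cntEqTo_mono s 'Q' i j0 hi (le_of_lt hj0) hil heq
    have hplt : cntLt s 'Q' < rkn s j0 := by omega
    refine ⟨cntLt s 'Q', by omega, hplt, ?_⟩
    rw [Mlist_getElem s j0 (cntLt s 'Q') (by omega)]
    split_ifs with hmark
    · rfl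
    · rw [sorted_eq_iff (srt s) (srt_pairwise s) 'Q' (cntLt s 'Q') (by rw [srt_length]; omega)]
      rw [srt_countP, srt_countP]
      have hsplit := countP_le_split s 'Q'
      have hcq : 0 < cntEq s 'Q' := by
        unfold cntEq
        rw [List.countP_pos_iff]
        exact ⟨'Q', by rw [← hQ0]; exact List.getElem_mem hj0, by simp⟩
      unfold cntLt at *
      omega
  · -- an earlier strictly smaller character: its marked slot was overwritten by the sentinel
    have h1 : rkn s i < s.countP (fun d => decide (d ≤ s[i])) := rkn_lt_le s i hil
    have h2 : s.countP (fun d => decide (d ≤ s[i]'hil)) ≤ cntLt s 'Q' :=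
      cntLe_le_cntLt s (s[i]'hil) 'Q' hlt
    have hplt : rkn s i < rkn s j0 := by omega
    refine ⟨rkn s i, by omega, hplt, ?_⟩
    rw [Mlist_getElem s j0 (rkn s i) (by omega), if_pos ⟨i, hi, rfl⟩]

theorem tight_list (s : List Char)
    (hex : ∃ j, j < s.length ∧ s.getD j ' ' = 'Q' ∧ ∃ i, i < j ∧ s.getD i ' ' ≤ 'Q') :
    (s.foldl nkStep (Mlist s 0, [])).2 ≠
      (List.range' 0 s.length).map (fun i => (rkn s i : Int)) := by
  obtain ⟨hj0n, hQ0', i, hij0, hile'⟩ := Nat.find_spec hex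
  set j0 : Nat := Nat.find hex with hj0def
  have hQ0 : s[j0]'hj0n = 'Q' := by rwa [List.getD_eq_getElem _ ' ' hj0n] at hQ0'
  have hil : i < s.length := by omega
  have hile : s[i]'hil ≤ 'Q' := by rwa [List.getD_eq_getElem _ ' ' hil] at hile'
  have hQOK : QOK s j0 := by
    intro j hj hq i2 hi2
    by_contra hnot
    exact Nat.find_min hex hj ⟨by omega, hq, i2, hi2, not_lt.mp hnot⟩
  have key := loopSeg s j0 0 [] (by omega) (by simpa using hQOK)
  simp only [List.drop_zero, Nat.zero_add, List.nil_append] at key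
  obtain ⟨p, hp, hplt, hpQ⟩ := exists_Q_slot s j0 hj0n hQ0 i hij0 hile
  have hmem : 'Q' ∈ Mlist s j0 := by rw [← hpQ]; exact List.getElem_mem _
  obtain ⟨m', hm'⟩ := Option.isSome_iff_exists.mp
    ((PySem.List.index?_isSome_iff (Mlist s j0) 'Q').mpr hmem)
  obtain ⟨hm'len, hm'val, hm'min⟩ := PySem.List.getElem_of_index?_eq_some hm'
  have hm'le : m' ≤ p := by
    by_contra hgt
    exact hm'min p (by omega) hpQ
  have hm'lt : m' < rkn s j0 := by omega
  have hsplit : s.foldl nkStep (Mlist s 0, ([] : List Int)) =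
      (s.drop j0).foldl nkStep ((s.take j0).foldl nkStep (Mlist s 0, [])) := by
    rw [← List.foldl_append, List.take_append_drop]
  have hdrop : s.drop j0 = s[j0] :: s.drop (j0 + 1) := (List.getElem_cons_drop hj0n).symm
  have hstep : nkStep (Mlist s j0, (List.range' 0 j0).map (fun i => (rkn s i : Int))) (s[j0]'hj0n)
      = ((Mlist s j0).set m' 'Q',
          (List.range' 0 j0).map (fun i => (rkn s i : Int)) ++ [(m' : Int)]) := by
    unfold nkStep
    rw [hQ0, hm']
  obtain ⟨t, ht⟩ := foldl_tail_append (s.drop (j0 + 1)) ((Mlist s j0).set m' 'Q')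
      ((List.range' 0 j0).map (fun i => (rkn s i : Int)) ++ [(m' : Int)])
  have hA : (s.foldl nkStep (Mlist s 0, ([] : List Int))).2 =
      (List.range' 0 j0).map (fun i => (rkn s i : Int)) ++ ([(m' : Int)] ++ t) := by
    rw [hsplit, key, hdrop, List.foldl_cons, hstep, ht, List.append_assoc]
  intro hcontra
  rw [hA] at hcontra
  have hL : ((List.range' 0 j0).map (fun i => (rkn s i : Int)) ++ ([(m' : Int)] ++ t))[j0]? =
      some (m' : Int) := by
    rw [List.getElem?_append_right (by simp)]
    simp
  have hR : ((List.range' 0 s.length).map (fun i => (rkn s i : Int)))[j0]? =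
      some ((rkn s j0 : Int)) := by
    have hlen : j0 < ((List.range' 0 s.length).map (fun i => (rkn s i : Int))).length := by
      simp [hj0n]
    rw [List.getElem?_eq_getElem hlen]
    simp
  rw [hcontra, hR] at hL
  have : (rkn s j0 : Int) = (m' : Int) := Option.some.inj hL
  have : rkn s j0 = m' := by exact_mod_cast this
  omega

theorem number_key_tight_aux (kp : String) (hD : D_number_key kp) :
    number_key kp ≠ number_key_alt kp := by
  have hex : ∃ j, j < kp.toList.length ∧ kp.toList.getD j ' ' = 'Q' ∧
      ∃ i, i < j ∧ kp.toList.getD i ' ' ≤ 'Q' := by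
    obtain ⟨⟨j, hj⟩, hq, ⟨i, hi⟩, hij, hle⟩ := hD
    refine ⟨j, hj, ?_, i, hij, ?_⟩
    · rw [List.getD_eq_getElem _ ' ' hj]; simpa using hq
    · rw [List.getD_eq_getElem _ ' ' hi]; simpa using hle
  have htl := tight_list kp.toList hex
  intro hcontra
  apply htl
  have hA : number_key kp = (kp.toList.foldl nkStep (Mlist kp.toList 0, [])).2 := by
    show ((PySem.List.pyRange 0 (PySem.List.len kp.toList) 1).foldl
        (fun st i => nkStep st (PySem.List.pyGetD kp.toList i ' '))
        (PySem.List.sorted kp.toList (fun c => c) false, [])).2 = _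
    rw [PySem.List.foldl_pyRange_zero_pyGetD,
      show PySem.List.sorted kp.toList (fun c => c) false = Mlist kp.toList 0
        from (Mlist_zero kp.toList).symm]
  have hB : number_key_alt kp =
      (List.range' 0 kp.toList.length).map (fun i => (rkn kp.toList i : Int)) := by
    unfold number_key_alt
    exact alt_eq_map kp.toList
  rw [← hA, ← hB, hcontra]

-- ===== VERDICT (by name: the statement is the Claim_ definition above) =====
theorem number_key_spec : Claim_unchanged_number_key := by
  intro kp _ hD
  have h1 := number_key_eq_map kp.toList (notD_QOK kp hD)
  have h2 := alt_eq_map kp.toList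
  show number_key kp = number_key_alt kp
  unfold number_key number_key_alt
  simp only at h1 h2 ⊢
  rw [h1, h2]

theorem number_key_changed : Claim_changed_number_key := by
  unfold Claim_changed_number_key; decide

theorem number_key_tight : Claim_exact_number_key := by
  intro kp _ hD
  exact number_key_tight_aux kp hD
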